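-- pv_equiv track=rewrite | github.com/mMyst/adel | adel/fit/axis_table_fitting.py | _create_index_plt_list
-- ===== SOURCE A (Python) =====
-- def _create_index_plt_list(first_axis_table_plant_ids, first_axis_table_index_axis_list):
--     '''
--     Create plant indexes column.
--     :Parameters:
--         - `first_axis_table_plant_ids` : the plant indexes.
--         - `first_axis_table_index_axis_list` : the axes column.
--     :Types:
--         - `first_axis_table_plant_ids` : list
--         - `first_axis_table_index_axis_list` : list
--
--     :return: The plant indexes column.
--     :rtype: list
--     '''
--     index_plt_list = []
--     current_plant_index = 0
--     for plant_id in first_axis_table_plant_ids: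
--         start_index = current_plant_index + 1
--         if 1 in first_axis_table_index_axis_list[start_index:]:
--             next_plant_first_row = first_axis_table_index_axis_list.index(1, start_index)
--         else:
--             next_plant_first_row = len(first_axis_table_index_axis_list)
--         current_plant_axes = first_axis_table_index_axis_list[current_plant_index:next_plant_first_row]
--         index_plt_list.extend([plant_id for current_plant_axis in current_plant_axes])
--         current_plant_index = next_plant_first_row
--     return index_plt_list
-- ===== SOURCE B (Python) =====
-- def _create_index_plt_list(first_axis_table_plant_ids, first_axis_table_index_axis_list):
--     '''Single pass: precompute the segment boundaries (positions of 1 after index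
--     0, plus both ends), then emit each plant id once per row of its segment.'''
--     axis = first_axis_table_index_axis_list
--     cuts = [0] + [i for i, v in enumerate(axis) if i > 0 and v == 1] + [len(axis)]
--     index_plt_list = []
--     for plant_id, (lo, hi) in zip(first_axis_table_plant_ids, zip(cuts, cuts[1:])):
--         index_plt_list.extend([plant_id] * (hi - lo))
--     return index_plt_list
-- ===== Notes on version B (the rewrite author's own statement) =====
-- stated objective: faster
-- what changed: Instead of re-scanning the axis list for each plant id with slice membership tests, .index calls and slicing, B computes the segment boundaries (positions of 1 after index 0, plus both ends) once in a single pass and then emits each plant id repeated by its segment length.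
import Mathlib
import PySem

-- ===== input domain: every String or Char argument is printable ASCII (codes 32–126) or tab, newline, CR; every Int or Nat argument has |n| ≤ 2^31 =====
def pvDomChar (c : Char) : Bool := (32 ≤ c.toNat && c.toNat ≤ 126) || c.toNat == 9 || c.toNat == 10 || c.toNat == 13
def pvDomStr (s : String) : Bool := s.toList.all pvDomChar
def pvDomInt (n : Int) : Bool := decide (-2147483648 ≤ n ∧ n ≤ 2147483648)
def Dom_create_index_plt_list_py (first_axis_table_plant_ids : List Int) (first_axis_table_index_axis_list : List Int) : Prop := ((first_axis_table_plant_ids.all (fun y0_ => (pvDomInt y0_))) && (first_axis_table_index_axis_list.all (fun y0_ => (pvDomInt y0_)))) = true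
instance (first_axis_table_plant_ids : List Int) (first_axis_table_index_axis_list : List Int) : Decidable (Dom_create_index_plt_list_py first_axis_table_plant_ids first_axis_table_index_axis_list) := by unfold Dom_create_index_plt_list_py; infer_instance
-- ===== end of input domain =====

-- B replaces A's per-plant rescans of the axis list (slice membership + .index) by a single
-- precomputed list of segment boundaries; objective: faster (one pass over the axis list).

-- ===== PORT A =====
-- step of A's 'for plant_id in …' loop; state = (index_plt_list, current_plant_index).
-- 'axis.index(1, start)' is ported as start + index-in-suffix: exact here since start ≥ 0
-- always holds (current_plant_index starts at 0 and is only ever set to a nonnegative value).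
def pvStepA (axis : List Int) (st : List Int × Int) (plant_id : Int) : List Int × Int :=
  let start := st.2 + 1
  let tail := PySem.List.slice axis (some start) none
  let next : Int :=
    if (1 : Int) ∈ tail then start + (((PySem.List.index? tail 1).getD 0 : Nat) : Int)
    else (axis.length : Int)
  let chunk := PySem.List.slice axis (some st.2) (some next)
  (st.1 ++ chunk.map (fun _ => plant_id), next)

def create_index_plt_list_py (first_axis_table_plant_ids : List Int) (first_axis_table_index_axis_list : List Int) : List Int :=
  (first_axis_table_plant_ids.foldl (pvStepA first_axis_table_index_axis_list) ([], 0)).1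

-- ===== PORT B =====
def create_index_plt_list_py_alt (first_axis_table_plant_ids : List Int) (first_axis_table_index_axis_list : List Int) : List Int :=
  let axis := first_axis_table_index_axis_list
  let cuts : List Int :=
    0 :: ((PySem.List.enumerate axis 0).filter (fun p => 0 < p.1 && p.2 == 1)).map (·.1)
      ++ [(axis.length : Int)]
  (first_axis_table_plant_ids.zip (cuts.zip cuts.tail)).foldl
    (fun out x => out ++ List.replicate (x.2.2 - x.2.1).toNat x.1) []

-- ===== PRECONDITION & SPEC =====
def Spec_create_index_plt_list_py (first_axis_table_plant_ids : List Int) (first_axis_table_index_axis_list : List Int) (out : List Int) : Prop := out = create_index_plt_list_py_alt first_axis_table_plant_ids first_axis_table_index_axis_list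
instance (first_axis_table_plant_ids : List Int) (first_axis_table_index_axis_list : List Int) (out : List Int) : Decidable (Spec_create_index_plt_list_py first_axis_table_plant_ids first_axis_table_index_axis_list out) := by unfold Spec_create_index_plt_list_py; infer_instance

-- ===== CLAIM (what is proved, stated in full; the proofs are below) =====
def Claim_equal_create_index_plt_list_py : Prop := ∀ (first_axis_table_plant_ids : List Int) (first_axis_table_index_axis_list : List Int), Dom_create_index_plt_list_py first_axis_table_plant_ids first_axis_table_index_axis_list → Spec_create_index_plt_list_py first_axis_table_plant_ids first_axis_table_index_axis_list (create_index_plt_list_py first_axis_table_plant_ids first_axis_table_index_axis_list)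

-- ===== LEMMAS AND PROOFS =====

-- positions (offset by k) of the 1s in a list, as Ints
def pvF (k : Nat) : List Int → List Int
  | [] => []
  | x :: xs => if x = 1 then (k : Int) :: pvF (k + 1) xs else pvF (k + 1) xs

theorem pvF_eq_nil {t : List Int} (h : (1 : Int) ∉ t) (k : Nat) : pvF k t = [] := by
  induction t generalizing k with
  | nil => rfl
  | cons x xs ih =>
    simp only [List.mem_cons, not_or] at h
    have hx : x ≠ 1 := fun hx => h.1 hx.symm
    simp [pvF, if_neg hx, ih h.2]

theorem pvF_of_index? {t : List Int} {j : Nat}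
    (h : PySem.List.index? t 1 = some j) (k : Nat) :
    pvF k t = ((k + j : Nat) : Int) :: pvF (k + j + 1) (t.drop (j + 1)) := by
  induction t generalizing k j with
  | nil => simp [PySem.List.index?] at h
  | cons x xs ih =>
    by_cases hx : x = 1
    · subst hx
      rw [PySem.List.index?_cons_self] at h
      cases h
      simp [pvF]
    · rw [PySem.List.index?_cons_of_ne xs hx] at h
      rcases Option.map_eq_some_iff.mp h with ⟨j', hj', rfl⟩
      have := ih hj' (k + 1)
      simp only [pvF, if_neg hx, List.drop_succ_cons]
      rw [this]
      congr 2 <;> omega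

theorem pvEnum_filter_map (xs : List Int) (k : Nat) (hk : 1 ≤ k) :
    ((PySem.List.enumerate xs (k : Int)).filter (fun p => 0 < p.1 && p.2 == 1)).map (·.1)
      = pvF k xs := by
  induction xs generalizing k with
  | nil => simp [PySem.List.enumerate_nil, pvF]
  | cons x xs ih =>
    rw [PySem.List.enumerate_cons, List.filter_cons]
    have hk' : ((k : Int) + 1) = ((k + 1 : Nat) : Int) := by push_cast; ring
    by_cases hx : x = 1
    · subst hx
      have hcond : (decide (0 < (k : Int)) && ((1 : Int) == 1)) = true := by
        simp; omega
      rw [hcond, if_pos rfl, List.map_cons, hk', ih (k + 1) (by omega)]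
      simp [pvF]
    · have hcond : (decide (0 < (k : Int)) && (x == 1)) = false := by
        simp [hx]
      rw [hcond, if_neg (by decide), hk', ih (k + 1) (by omega), pvF, if_neg hx]

-- the cuts-list remainder when A's current_plant_index is c
def pvR (axis : List Int) (c : Nat) : List Int :=
  (c : Int) :: pvF (c + 1) (axis.drop (c + 1)) ++ [(axis.length : Int)]

-- once current = len(axis), A's loop appends nothing forever
theorem pvStayA (axis : List Int) (ps : List Int) (acc : List Int) :
    (ps.foldl (pvStepA axis) (acc, (axis.length : Int))).1 = acc := by
  induction ps generalizing acc with
  | nil => rfl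
  | cons p ps ih =>
    have hstep : pvStepA axis (acc, (axis.length : Int)) p = (acc, (axis.length : Int)) := by
      simp only [pvStepA]
      rw [show ((axis.length : Int) + 1) = ((axis.length + 1 : Nat) : Int) by push_cast; ring,
        PySem.List.slice_from_natCast]
      have h2 : axis.drop (axis.length + 1) = [] := List.drop_eq_nil_of_le (by omega)
      rw [h2]
      simp only [List.not_mem_nil, if_false]
      rw [PySem.List.slice_natCast]
      simp
    simp only [List.foldl_cons, hstep]
    exact ih acc

-- main invariant: A's fold from current_plant_index = c produces exactly B's extend-loop
-- over the remaining cuts pairs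
theorem pvMain (axis : List Int) (ps : List Int) (c : Nat) (hc : c ≤ axis.length)
    (acc : List Int) :
    (ps.foldl (pvStepA axis) (acc, (c : Int))).1
      = acc ++ (ps.zip ((pvR axis c).zip (pvR axis c).tail)).flatMap
          (fun x => List.replicate (x.2.2 - x.2.1).toNat x.1) := by
  induction ps generalizing c acc with
  | nil => simp
  | cons p ps ih =>
    have hstart : ((c : Int) + 1) = ((c + 1 : Nat) : Int) := by push_cast; ring
    have ht : PySem.List.slice axis (some ((c + 1 : Nat) : Int)) none = axis.drop (c + 1) :=
      PySem.List.slice_from_natCast axis (c + 1)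
    by_cases hmem : (1 : Int) ∈ axis.drop (c + 1)
    · -- a later 1 exists: next = c + 1 + (index of 1 in the suffix)
      rcases Option.isSome_iff_exists.mp
        ((PySem.List.index?_isSome_iff (axis.drop (c + 1)) 1).mpr hmem) with ⟨j, hj⟩
      have hjlt : j < (axis.drop (c + 1)).length :=
        (PySem.List.getElem_of_index?_eq_some hj).fst
      have htlen : (axis.drop (c + 1)).length = axis.length - (c + 1) := by simp
      have hc1 : c + 1 ≤ axis.length := by
        by_contra hlt
        have : axis.drop (c + 1) = [] := List.drop_eq_nil_of_le (by omega)
        rw [this] at hmem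
        exact (List.not_mem_nil) hmem
      have hc'le : c + 1 + j ≤ axis.length := by omega
      have hstep : pvStepA axis (acc, (c : Int)) p
          = (acc ++ List.replicate (c + 1 + j - c) p, ((c + 1 + j : Nat) : Int)) := by
        simp only [pvStepA]
        rw [hstart, ht, if_pos hmem, hj, Option.getD_some,
          show ((c + 1 : Nat) : Int) + ((j : Nat) : Int) = ((c + 1 + j : Nat) : Int) by
            push_cast; ring,
          PySem.List.slice_natCast, List.map_const']
        have hlen : ((axis.drop c).take (c + 1 + j - c)).length = c + 1 + j - c := by
          simp; omega
        rw [hlen]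
      have hdd : (axis.drop (c + 1)).drop (j + 1) = axis.drop (c + 1 + j + 1) := by
        rw [List.drop_drop]; congr 1
      have hRstep : pvR axis c = (c : Int) :: pvR axis (c + 1 + j) := by
        unfold pvR
        rw [pvF_of_index? hj (c + 1), hdd]
        rfl
      have hzip : (pvR axis c).zip (pvR axis c).tail
          = ((c : Int), ((c + 1 + j : Nat) : Int))
            :: ((pvR axis (c + 1 + j)).zip (pvR axis (c + 1 + j)).tail) := by
        rw [hRstep]
        rfl
      rw [List.foldl_cons, hstep, ih (c + 1 + j) hc'le, hzip, List.zip_cons_cons,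
        List.flatMap_cons, List.append_assoc]
      congr 2
      simp only []
      congr 1
      omega
    · -- no later 1: next = len(axis), and the loop never appends anything again
      have hF : pvF (c + 1) (axis.drop (c + 1)) = [] := pvF_eq_nil hmem (c + 1)
      have hstep : pvStepA axis (acc, (c : Int)) p
          = (acc ++ List.replicate (axis.length - c) p, (axis.length : Int)) := by
        simp only [pvStepA]
        rw [hstart, ht, if_neg hmem, PySem.List.slice_natCast, List.map_const']
        have hlen : ((axis.drop c).take (axis.length - c)).length = axis.length - c := by
          simp
        rw [hlen]
      rw [List.foldl_cons, hstep, pvStayA]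
      have hR : pvR axis c = [(c : Int), (axis.length : Int)] := by
        unfold pvR; rw [hF]; rfl
      rw [hR, show ([(c : Int), (axis.length : Int)].zip
          [(c : Int), (axis.length : Int)].tail)
          = [((c : Int), (axis.length : Int))] by rfl,
        List.zip_cons_cons, List.zip_nil_right, List.flatMap_cons, List.flatMap_nil,
        List.append_nil]
      congr 1
      simp only []
      congr 1
      omega

-- B's boundary list is exactly pvR axis 0
theorem pvCuts (axis : List Int) :
    (0 : Int) :: ((PySem.List.enumerate axis 0).filter (fun p => 0 < p.1 && p.2 == 1)).map (·.1)
      ++ [(axis.length : Int)] = pvR axis 0 := by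
  cases axis with
  | nil => rfl
  | cons a rest =>
    rw [PySem.List.enumerate_cons, List.filter_cons]
    have hcond : (decide ((0 : Int) < (0 : Int)) && (a == 1)) = false := by simp
    rw [hcond, if_neg (by decide),
      show ((0 : Int) + 1) = ((1 : Nat) : Int) by norm_num,
      pvEnum_filter_map rest 1 (by omega)]
    rfl

-- ===== VERDICT (by name: the statement is the Claim_ definition above) =====
theorem create_index_plt_list_py_spec : Claim_equal_create_index_plt_list_py := by
  intro pids axis _
  unfold Spec_create_index_plt_list_py
  simp only [create_index_plt_list_py, create_index_plt_list_py_alt]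
  rw [pvCuts, PySem.List.foldl_append_eq_flatMap, List.nil_append]
  have := pvMain axis pids 0 (by omega) []
  rw [Nat.cast_zero] at this
  rw [this, List.nil_append]
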